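/- GENERATED by mk_final_copies.py from the proof of the farm's unit `start_decoder.2b` (farm:start_decoder.2b.1: Proof.lean) as the
   re-elaboration sweep compiled it — do not edit. -/
import Asan.CheckWalk
import Vorbis.Spec.StartDecoderATest
import Vorbis.Spec.StartDecoderBTest
import Vorbis.Spec.Reader
import Vorbis.Spec.Units.start_decoder_2b

open X86 X86.User Asan Vorbis Vorbis.Spec Vorbis.Spec.StartDecoder Vorbis.Spec.StartDecoder.P2

namespace Vorbis.Spec.start_decoder_2b

set_option maxRecDepth 4000 in
set_option maxHeartbeats 4000000 in
/-- **Segment `.2b`** (0x113a46 … 0x113acc + 0x113bee … 0x113bf8, lines 3616 – 3625 and 3641): `!start_page(f)` → the epilogue with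
eax = 0 (`Pt.atERR`); the three checked loads of `*f` (`page_flag`, `segment_count`, `segments[0]`: `Bits.site_field`) and their tests, each
failing into a stub with a point there (`Pt.step` over the own stores); `segments[0] == 30`: `get8(f)`, then `== 1` → `At3` (`Pt.at3`:
ONE20 and Z10 read back through the stores and over get8's footprint, `next_seg = 0` from start_page's result) or the stub 0x113bfa;
`segments[0] == 64`: `getn(f, header, 6)` (destination = the frame object `header`) returns into 0x113ad1 with a point at `cut3`. -/
theorem seg2b {Lay : Layout} (hLay : Lay.hi = 0x1000000) {μ : Microarch} (hμ : UserX.MicroOK μ) {u₀ : State}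
    (hcode : HasCodeNat Lay u₀ Vorbis.L.start_decoder.entry Vorbis.Code.code_start_decoder.nat Vorbis.L.start_decoder.size)
    (hld1 : Asan.SmallCheck Lay μ Vorbis.WayInv (Vorbis.CodeOK u₀) [.rax, .rdx] 1 Vorbis.L.__asan_load1_noabort.entry)
    (hld4 : Asan.SmallCheck Lay μ Vorbis.WayInv (Vorbis.CodeOK u₀) [.rax, .rcx, .rdx] 4 Vorbis.L.__asan_load4_noabort.entry)
    (hgetn : ∀ (others : List Obj) (frames : List (Nat × FrameLayout)) (Blk : Block → Prop) (len : Nat),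
      Calls Lay μ Vorbis.WayInv (Vorbis.conv u₀) Vorbis.L.getn.entry (Vorbis.Spec.getn.spec others frames Blk len))
    (hget8 : ∀ (others : List Obj) (frames : List (Nat × FrameLayout)) (Blk : Block → Prop) (len : Nat),
      Calls Lay μ Vorbis.WayInv (Vorbis.conv u₀) Vorbis.L.get8.entry (Vorbis.Spec.get8.spec others frames Blk len))
    {g : Ghost} {A : Arena × List Obj} {v : State} (hb : Body2b u₀ g A v) :
    ReachVia Lay μ Vorbis.WayInv v
      (fun w => At3 u₀ g w ∨ AtERR u₀ g w ∨ AtStub u₀ g A w ∨ Pt u₀ g A Vorbis.L.start_decoder.cut3 w) := by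
  have hpt := hb.pt
  have geo := hpt.geo
  obtain ⟨gr, gr8, glo, ghi, gobj, gobjLo, gobjHi, glog⟩ := geo
  have hfr := hpt.frame
  have w_rip := hfr.rip
  have hRn : (v.reg .rsp).toNat = g.R := by
    rw [hfr.rsp]
    exact toNat_addr _ (by omega)
  have haf : (addr g.f).toNat = g.f := toNat_addr _ (by omega)
  have hrbp := hpt.rbp
  have w_eq : Mem.EqOn Vorbis.L.textLo Vorbis.L.textHi u₀.mem v.mem := hfr.code
  have hdf : v.flags .df = false := (show abiInv _ from hfr.inv).1
  have hmx : v.mxcsr &&& 0x1F80 = 0x1F80 := (show abiInv _ from hfr.inv).2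
  have hsse := Vorbis.sseOK_of_abiInv hfr.inv
  have hg8 := hget8 A.2 g.frames' (g.Blk A) g.len
  have hgn := hgetn A.2 g.frames' (g.Blk A) g.len
  have hL : BlkLive (g.Blk A) (Live (stackObjs g.frames' ++ A.2)) := hpt.inv.env.live
  have hbits0 : Bits (g.Blk A) g.len v.mem g.f := hpt.inv.bits
  u_walk hcode [hμ.vendor] until [Vorbis.L.start_decoder.cut4, Vorbis.L.start_decoder.cut14, Vorbis.L.start_decoder.at_113b15,
    Vorbis.L.start_decoder.at_113b7a, Vorbis.L.start_decoder.at_113b89, Vorbis.L.start_decoder.at_113b98,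
    Vorbis.L.start_decoder.at_113baa, Vorbis.L.start_decoder.at_113bfa] span [Vorbis.L.textLo, Vorbis.L.textHi] side (v_side)
  · -- 0x113a55, the checked load of `f->page_flag`: a field of `*f`
    have hun : ShadowUntouched v.mem s_113a55.mem := by v_untouched
    have hs := hbits0.site_field hL 1747 1 (by omega) (by omega) rfl
    exact Vorbis.Spec.check_site hfr.shadow hun hs (by u_omega)
  · -- 0x113a85, the checked load of `f->segment_count`: a field of `*f`
    have hun : ShadowUntouched v.mem s_113a85.mem := by v_untouched
    have hs := hbits0.site_field hL 1488 4 (by omega) (by omega) rfl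
    exact Vorbis.Spec.check_site hfr.shadow hun hs (by u_omega)
  · -- 0x113aa4, the checked load of `f->segments[0]`: a field of `*f`
    have hun : ShadowUntouched v.mem s_113aa4.mem := by v_untouched
    have hs := hbits0.site_field hL 1492 1 (by omega) (by omega) rfl
    exact Vorbis.Spec.check_site hfr.shadow hun hs (by u_omega)
  · -- call_inv (get8)
    v_inv
  · -- get8's precondition
    have hun : ShadowUntouched v.mem s_113bf1.mem := by v_untouched
    have hso : Mem.SameExcept [⟨(v.reg .rsp).toNat - 408, (v.reg .rsp).toNat⟩, ⟨(v.reg .rsp).toNat + 16, (v.reg .rsp).toNat + 17⟩,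
        ⟨(v.reg .rsp).toNat + 32, (v.reg .rsp).toNat + 36⟩, ⟨g.f + 1749, g.f + 1750⟩, ⟨g.f + 136, g.f + 144⟩]
        v.mem s_113bf1.mem := by
      u_same
    rw [hRn] at hso
    obtain ⟨hb1, _⟩ := own_stores hpt.geo hpt.inv.bits hso (ownWins_ok g hpt.geo)
    have e : (s_113bf1.reg .rdi).toNat = g.f := by
      rw [w_rdi]
      exact haf
    refine ⟨shadowPre_call hfr ?_ hun, ?_, ?_⟩
    · rw [w_rsp]
      u_omega
    · rw [e]
      exact readerEnv hpt.hand hpt.inv.env.live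
    · rw [e]
      exact hb1
  · -- call_inv (getn)
    v_inv
  · -- getn's precondition: `ReaderPre`, `n = 6`, the destination is the frame object `header` (`[R + 0xa0, R + 0xa6)`), off `*f` and the input
    have hun : ShadowUntouched v.mem s_113acc.mem := by v_untouched
    have hso : Mem.SameExcept [⟨(v.reg .rsp).toNat - 408, (v.reg .rsp).toNat⟩, ⟨(v.reg .rsp).toNat + 16, (v.reg .rsp).toNat + 17⟩,
        ⟨(v.reg .rsp).toNat + 32, (v.reg .rsp).toNat + 36⟩, ⟨g.f + 1749, g.f + 1750⟩, ⟨g.f + 136, g.f + 144⟩]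
        v.mem s_113acc.mem := by
      u_same
    rw [hRn] at hso
    obtain ⟨hb1, _⟩ := own_stores hpt.geo hpt.inv.bits hso (ownWins_ok g hpt.geo)
    have e : (s_113acc.reg .rdi).toNat = g.f := by
      rw [w_rdi]
      exact haf
    have esi : (s_113acc.reg .rsi).toNat = g.R + 160 := by
      rw [w_rsi]
      u_omega
    have edx : argInt (s_113acc.reg .rdx) = 6 := by
      rw [w_rdx]
      rfl
    have hlen := hbits0.S1.2.2
    simp only [voff] at hlen
    refine ⟨⟨shadowPre_call hfr ?_ hun, ?_, ?_⟩, ?_, ?_, ?_⟩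
    · rw [w_rsp]
      u_omega
    · rw [e]
      exact readerEnv hpt.hand hpt.inv.env.live
    · rw [e]
      exact hb1
    · rw [edx]
      decide
    · right
      rw [edx, esi]
      refine ⟨⟨g.base + 80, 6, .stack⟩, ?_, ?_, ?_⟩
      · unfold Ghost.frames'
        rw [stackObjs_cons]
        apply List.mem_append_left
        apply List.mem_append_left
        exact List.mem_cons_of_mem _ (List.mem_cons_of_mem _ List.mem_cons_self)
      · simp only [Ghost.base]
        omega
      · simp only [Ghost.base]
        omega
    · rw [e, esi, edx]
      refine ⟨?_, ?_⟩
      · left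
        simp only [voff]
        omega
      · omega
  · -- `!start_page(f)`: the epilogue with eax = 0
    refine ReachVia.done (Or.inr (Or.inl ?_))
    have hpt' : Pt u₀ g A pc_ERR s_113a48 :=
      hpt.same_mem w_rip (w_kept.get .rsp rfl) (w_kept.get .rbp rfl) (by v_inv) w_mem
    apply hpt'.atERR
    rw [w_kept.get .rax rfl]
    rcases hb.result with h0 | h1
    · rw [h0]
      rfl
    · rw [h1] at hbr_113a48
      exact absurd hbr_113a48 (by decide)
  · -- the branch at 0x113a63 to a stub: the point over the own stores
    have hbits : Bits (g.Blk A) g.len s_113a63.mem g.f := by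
      have hso : Mem.SameExcept [⟨(v.reg .rsp).toNat - 408, (v.reg .rsp).toNat⟩, ⟨(v.reg .rsp).toNat + 16, (v.reg .rsp).toNat + 17⟩,
        ⟨(v.reg .rsp).toNat + 32, (v.reg .rsp).toNat + 36⟩, ⟨g.f + 1749, g.f + 1750⟩, ⟨g.f + 136, g.f + 144⟩]
          v.mem s_113a63.mem := by
        u_same
      rw [hRn] at hso
      exact (own_stores hpt.geo hpt.inv.bits hso (ownWins_ok g hpt.geo)).1
    have hs : Mem.SameExcept [⟨(v.reg .rsp).toNat - 408, (v.reg .rsp).toNat⟩, ⟨(v.reg .rsp).toNat + 16, (v.reg .rsp).toNat + 17⟩,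
        ⟨(v.reg .rsp).toNat + 32, (v.reg .rsp).toNat + 36⟩, ⟨(v.reg .rsp).toNat + 160, (v.reg .rsp).toNat + 166⟩,
        ⟨g.f + 48, g.f + 56⟩, ⟨g.f + 84, g.f + 96⟩, ⟨g.f + 136, g.f + 144⟩, ⟨g.f + 1484, g.f + 1748⟩,
        ⟨g.f + 1752, g.f + 1756⟩, ⟨g.f + 1776, g.f + 1784⟩] v.mem s_113a63.mem := by
      u_same
    rw [hRn] at hs
    have hun : ShadowUntouched v.mem s_113a63.mem := by v_untouched
    refine ReachVia.done (Or.inr (Or.inr (Or.inl ⟨_, Or.inr (Or.inl rfl), ?_⟩)))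
    exact hpt.step w_rip w_rsp (w_kept.get .rbp rfl) w_eq (by v_inv) hs (allWins_ok g hpt.geo) hun hbits
  · -- the branch at 0x113a6b to a stub: the point over the own stores
    have hbits : Bits (g.Blk A) g.len s_113a6b.mem g.f := by
      have hso : Mem.SameExcept [⟨(v.reg .rsp).toNat - 408, (v.reg .rsp).toNat⟩, ⟨(v.reg .rsp).toNat + 16, (v.reg .rsp).toNat + 17⟩,
        ⟨(v.reg .rsp).toNat + 32, (v.reg .rsp).toNat + 36⟩, ⟨g.f + 1749, g.f + 1750⟩, ⟨g.f + 136, g.f + 144⟩]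
          v.mem s_113a6b.mem := by
        u_same
      rw [hRn] at hso
      exact (own_stores hpt.geo hpt.inv.bits hso (ownWins_ok g hpt.geo)).1
    have hs : Mem.SameExcept [⟨(v.reg .rsp).toNat - 408, (v.reg .rsp).toNat⟩, ⟨(v.reg .rsp).toNat + 16, (v.reg .rsp).toNat + 17⟩,
        ⟨(v.reg .rsp).toNat + 32, (v.reg .rsp).toNat + 36⟩, ⟨(v.reg .rsp).toNat + 160, (v.reg .rsp).toNat + 166⟩,
        ⟨g.f + 48, g.f + 56⟩, ⟨g.f + 84, g.f + 96⟩, ⟨g.f + 136, g.f + 144⟩, ⟨g.f + 1484, g.f + 1748⟩,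
        ⟨g.f + 1752, g.f + 1756⟩, ⟨g.f + 1776, g.f + 1784⟩] v.mem s_113a6b.mem := by
      u_same
    rw [hRn] at hs
    have hun : ShadowUntouched v.mem s_113a6b.mem := by v_untouched
    refine ReachVia.done (Or.inr (Or.inr (Or.inl ⟨_, Or.inr (Or.inr (Or.inl rfl)), ?_⟩)))
    exact hpt.step w_rip w_rsp (w_kept.get .rbp rfl) w_eq (by v_inv) hs (allWins_ok g hpt.geo) hun hbits
  · -- the branch at 0x113a78 to a stub: the point over the own stores
    have hbits : Bits (g.Blk A) g.len s_113a78.mem g.f := by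
      have hso : Mem.SameExcept [⟨(v.reg .rsp).toNat - 408, (v.reg .rsp).toNat⟩, ⟨(v.reg .rsp).toNat + 16, (v.reg .rsp).toNat + 17⟩,
        ⟨(v.reg .rsp).toNat + 32, (v.reg .rsp).toNat + 36⟩, ⟨g.f + 1749, g.f + 1750⟩, ⟨g.f + 136, g.f + 144⟩]
          v.mem s_113a78.mem := by
        u_same
      rw [hRn] at hso
      exact (own_stores hpt.geo hpt.inv.bits hso (ownWins_ok g hpt.geo)).1
    have hs : Mem.SameExcept [⟨(v.reg .rsp).toNat - 408, (v.reg .rsp).toNat⟩, ⟨(v.reg .rsp).toNat + 16, (v.reg .rsp).toNat + 17⟩,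
        ⟨(v.reg .rsp).toNat + 32, (v.reg .rsp).toNat + 36⟩, ⟨(v.reg .rsp).toNat + 160, (v.reg .rsp).toNat + 166⟩,
        ⟨g.f + 48, g.f + 56⟩, ⟨g.f + 84, g.f + 96⟩, ⟨g.f + 136, g.f + 144⟩, ⟨g.f + 1484, g.f + 1748⟩,
        ⟨g.f + 1752, g.f + 1756⟩, ⟨g.f + 1776, g.f + 1784⟩] v.mem s_113a78.mem := by
      u_same
    rw [hRn] at hs
    have hun : ShadowUntouched v.mem s_113a78.mem := by v_untouched
    refine ReachVia.done (Or.inr (Or.inr (Or.inl ⟨_, Or.inr (Or.inr (Or.inr (Or.inl rfl))), ?_⟩)))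
    exact hpt.step w_rip w_rsp (w_kept.get .rbp rfl) w_eq (by v_inv) hs (allWins_ok g hpt.geo) hun hbits
  · -- the branch at 0x113a97 to a stub: the point over the own stores
    have hbits : Bits (g.Blk A) g.len s_113a97.mem g.f := by
      have hso : Mem.SameExcept [⟨(v.reg .rsp).toNat - 408, (v.reg .rsp).toNat⟩, ⟨(v.reg .rsp).toNat + 16, (v.reg .rsp).toNat + 17⟩,
        ⟨(v.reg .rsp).toNat + 32, (v.reg .rsp).toNat + 36⟩, ⟨g.f + 1749, g.f + 1750⟩, ⟨g.f + 136, g.f + 144⟩]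
          v.mem s_113a97.mem := by
        u_same
      rw [hRn] at hso
      exact (own_stores hpt.geo hpt.inv.bits hso (ownWins_ok g hpt.geo)).1
    have hs : Mem.SameExcept [⟨(v.reg .rsp).toNat - 408, (v.reg .rsp).toNat⟩, ⟨(v.reg .rsp).toNat + 16, (v.reg .rsp).toNat + 17⟩,
        ⟨(v.reg .rsp).toNat + 32, (v.reg .rsp).toNat + 36⟩, ⟨(v.reg .rsp).toNat + 160, (v.reg .rsp).toNat + 166⟩,
        ⟨g.f + 48, g.f + 56⟩, ⟨g.f + 84, g.f + 96⟩, ⟨g.f + 136, g.f + 144⟩, ⟨g.f + 1484, g.f + 1748⟩,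
        ⟨g.f + 1752, g.f + 1756⟩, ⟨g.f + 1776, g.f + 1784⟩] v.mem s_113a97.mem := by
      u_same
    rw [hRn] at hs
    have hun : ShadowUntouched v.mem s_113a97.mem := by v_untouched
    refine ReachVia.done (Or.inr (Or.inr (Or.inl ⟨_, Or.inr (Or.inr (Or.inr (Or.inr (Or.inl rfl)))), ?_⟩)))
    exact hpt.step w_rip w_rsp (w_kept.get .rbp rfl) w_eq (by v_inv) hs (allWins_ok g hpt.geo) hun hbits
  · -- the return of get8 (0x113bf6): `cmp al, 1 ; je 113c0c`
    v_after_call w_rsp_113bf1 w_mem_113bf1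
    simp only [w_rdi_113bf1, haf] at w_same
    have hpost : Get8Post (g.Blk A) g.len (s_113bf1.reg .rdi).toNat s_113bf1 s_113bf1r := w_post
    have e : (s_113bf1.reg .rdi).toNat = g.f := by
      rw [w_rdi_113bf1]
      exact haf
    rw [e] at hpost
    have hbits : Bits (g.Blk A) g.len s_113bf1r.mem g.f := hpost.reader.bits
    -- the two footprints of the returned memory (each `u_same` in a scope of its own)
    obtain ⟨hs, hs3⟩ :
        Mem.SameExcept [⟨(v.reg .rsp).toNat - 408, (v.reg .rsp).toNat⟩, ⟨(v.reg .rsp).toNat + 16, (v.reg .rsp).toNat + 17⟩,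
        ⟨(v.reg .rsp).toNat + 32, (v.reg .rsp).toNat + 36⟩, ⟨(v.reg .rsp).toNat + 160, (v.reg .rsp).toNat + 166⟩,
        ⟨g.f + 48, g.f + 56⟩, ⟨g.f + 84, g.f + 96⟩, ⟨g.f + 136, g.f + 144⟩, ⟨g.f + 1484, g.f + 1748⟩,
        ⟨g.f + 1752, g.f + 1756⟩, ⟨g.f + 1776, g.f + 1784⟩] v.mem s_113bf1r.mem ∧
        Mem.SameExcept [⟨(v.reg .rsp).toNat - 408, (v.reg .rsp).toNat⟩, ⟨(v.reg .rsp).toNat + 16, (v.reg .rsp).toNat + 17⟩,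
        ⟨(v.reg .rsp).toNat + 32, (v.reg .rsp).toNat + 36⟩, ⟨g.f + 48, g.f + 56⟩, ⟨g.f + 136, g.f + 144⟩] v.mem s_113bf1r.mem := by
      refine ⟨?_, ?_⟩
      · u_same
      · u_same
    rw [hRn] at hs hs3
    have hun : ShadowUntouched v.mem s_113bf1r.mem := by v_untouched
    -- what the stores of this segment left in the two spill slots, read at get8's entry
    have ea20 : addr (g.R + 32) = v.reg .rsp + 32 := by
      rw [hfr.rsp, Vorbis.addr_add_lit]
    have ea10 : addr (g.R + 16) = v.reg .rsp + 16 := by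
      rw [hfr.rsp, Vorbis.addr_add_lit]
    have a20 : s_113bf1.mem.readLE (v.reg .rsp + 32) 4 = (BitVec.ofNat 32 (v.mem.readLE (addr g.f + 1488) 4)).toNat := by
      rw [w_mem_113bf1]
      u_read
    have a10 : s_113bf1.mem.readLE (v.reg .rsp + 16) 1 =
        (BitVec.setWidth 8 (BitVec.zeroExtend 32 (BitVec.ofNat 8 (v.mem.readLE (addr g.f + 1747) 1)) &&& 1#32)).toNat := by
      rw [w_mem_113bf1]
      u_read
    -- … and over get8's footprint (the callee's stack, `stream`, `eof`)
    have eqs : Mem.EqOn (g.R + 16) (g.R + 36) s_113bf1.mem s_113bf1r.mem := by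
      rw [w_mem_113bf1]
      apply w_same.eqOn
      intro w hw
      simp only [List.mem_cons, List.mem_nil_iff, or_false] at hw
      rcases hw with rfl | rfl | rfl <;> simp only [] <;> u_omega
    have h20 : s_113bf1r.mem.u32 (g.R + 0x20) = 1 := by
      rw [eqs.u32 _ (by omega) (by omega) (by omega)]
      unfold Mem.u32
      rw [ea20, a20, BitVec.toNat_ofNat]
      exact hbr_113a97
    have h10 : s_113bf1r.mem.u8 (g.R + 0x10) = 0 := by
      rw [eqs.u8 _ (by omega) (by omega) (by omega)]
      unfold Mem.u8
      rw [ea10, a10, BitVec.toNat_setWidth, hbr_113a78]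
    -- the page is started: start_page returned 1, and nothing since wrote `next_seg`
    have hrax1 : v.reg .rax = 1 := by
      rcases hb.result with h0 | h1
      · rw [h0] at hbr_113a48
        exact absurd rfl hbr_113a48
      · exact h1
    have hn : stb_vorbis.next_seg s_113bf1r.mem g.f = 0 := by
      have en : Mem.EqOn (g.f + 1752) (g.f + 1756) v.mem s_113bf1r.mem := by
        apply hs3.eqOn
        intro w hw
        simp only [List.mem_cons, List.mem_nil_iff, or_false] at hw
        rcases hw with rfl | rfl | rfl | rfl | rfl <;> simp only [] <;> omega
      have h0 := hb.started hrax1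
      simp only [vacc, voff] at h0 ⊢
      rw [en.i32 _ (by omega) (by omega) (by omega)]
      exact h0
    clear w_same
    u_walk hcode [hμ.vendor] until [Vorbis.L.start_decoder.cut14, Vorbis.L.start_decoder.at_113bfa] span [Vorbis.L.textLo, Vorbis.L.textHi] side (v_side)
    · -- `get8(f) == VORBIS_packet_id`: segment .3
      refine ReachVia.done (Or.inl ?_)
      have hpt' : Pt u₀ g A pc_3 s_113bf8 := by
        refine hpt.step w_rip w_rsp (w_kept.get .rbp rfl) w_eq ?_ (ws := _) ?_ (allWins_ok g hpt.geo) ?_ ?_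
        · v_inv
        · rw [w_mem]
          exact hs
        · rw [w_mem]
          exact hun
        · rw [w_mem]
          exact hbits
      apply hpt'.at3
      · rw [w_mem]
        exact h20
      · rw [w_mem]
        exact h10
      · rw [w_mem]
        exact hn
    · -- otherwise the stub 0x113bfa
      refine ReachVia.done (Or.inr (Or.inr (Or.inl ⟨_, Or.inr (Or.inr (Or.inr (Or.inr (Or.inr (Or.inr rfl))))), ?_⟩)))
      refine hpt.step w_rip w_rsp (w_kept.get .rbp rfl) w_eq ?_ (ws := _) ?_ (allWins_ok g hpt.geo) ?_ ?_
      · v_inv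
      · rw [w_mem]
        exact hs
      · rw [w_mem]
        exact hun
      · rw [w_mem]
        exact hbits
  · -- the branch at 0x113aba to a stub: the point over the own stores
    have hbits : Bits (g.Blk A) g.len s_113aba.mem g.f := by
      have hso : Mem.SameExcept [⟨(v.reg .rsp).toNat - 408, (v.reg .rsp).toNat⟩, ⟨(v.reg .rsp).toNat + 16, (v.reg .rsp).toNat + 17⟩,
        ⟨(v.reg .rsp).toNat + 32, (v.reg .rsp).toNat + 36⟩, ⟨g.f + 1749, g.f + 1750⟩, ⟨g.f + 136, g.f + 144⟩]
          v.mem s_113aba.mem := by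
        u_same
      rw [hRn] at hso
      exact (own_stores hpt.geo hpt.inv.bits hso (ownWins_ok g hpt.geo)).1
    have hs : Mem.SameExcept [⟨(v.reg .rsp).toNat - 408, (v.reg .rsp).toNat⟩, ⟨(v.reg .rsp).toNat + 16, (v.reg .rsp).toNat + 17⟩,
        ⟨(v.reg .rsp).toNat + 32, (v.reg .rsp).toNat + 36⟩, ⟨(v.reg .rsp).toNat + 160, (v.reg .rsp).toNat + 166⟩,
        ⟨g.f + 48, g.f + 56⟩, ⟨g.f + 84, g.f + 96⟩, ⟨g.f + 136, g.f + 144⟩, ⟨g.f + 1484, g.f + 1748⟩,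
        ⟨g.f + 1752, g.f + 1756⟩, ⟨g.f + 1776, g.f + 1784⟩] v.mem s_113aba.mem := by
      u_same
    rw [hRn] at hs
    have hun : ShadowUntouched v.mem s_113aba.mem := by v_untouched
    refine ReachVia.done (Or.inr (Or.inr (Or.inl ⟨_, Or.inl rfl, ?_⟩)))
    exact hpt.step w_rip w_rsp (w_kept.get .rbp rfl) w_eq (by v_inv) hs (allWins_ok g hpt.geo) hun hbits
  · -- the return of getn: the point at cut3
    v_after_call w_rsp_113acc w_mem_113acc
    have e6 : (argInt (Word.ofBV 6#32 : Word)).toNat = 6 := rfl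
    simp only [w_rdi_113acc, w_rsi_113acc, w_rdx_113acc, haf, e6] at w_same
    have hpost : GetnPost (g.Blk A) g.len (s_113acc.reg .rdi).toNat (s_113acc.reg .rsi).toNat (argInt (s_113acc.reg .rdx))
        s_113acc s_113accr := w_post
    have e : (s_113acc.reg .rdi).toNat = g.f := by
      rw [w_rdi_113acc]
      exact haf
    rw [e] at hpost
    have hs : Mem.SameExcept [⟨(v.reg .rsp).toNat - 408, (v.reg .rsp).toNat⟩, ⟨(v.reg .rsp).toNat + 16, (v.reg .rsp).toNat + 17⟩,
        ⟨(v.reg .rsp).toNat + 32, (v.reg .rsp).toNat + 36⟩, ⟨(v.reg .rsp).toNat + 160, (v.reg .rsp).toNat + 166⟩,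
        ⟨g.f + 48, g.f + 56⟩, ⟨g.f + 84, g.f + 96⟩, ⟨g.f + 136, g.f + 144⟩, ⟨g.f + 1484, g.f + 1748⟩,
        ⟨g.f + 1752, g.f + 1756⟩, ⟨g.f + 1776, g.f + 1784⟩] v.mem s_113accr.mem := by
      u_same
    rw [hRn] at hs
    have hun : ShadowUntouched v.mem s_113accr.mem := by v_untouched
    refine ReachVia.done (Or.inr (Or.inr (Or.inr ?_)))
    exact hpt.step w_rip w_rsp (w_kept.get .rbp rfl) w_eq w_inv hs (allWins_ok g hpt.geo) hun hpost.reader.bits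

end Vorbis.Spec.start_decoder_2b

/-- Unit `start_decoder.2b`: segment 2b of `start_decoder` takes `Body2b` to `At3`, `AtERR`, a point at a stub, or the point at `cut3`. -/
theorem Vorbis.Spec.Worked.start_decoder_2b_ok : Vorbis.Spec.start_decoder_2b.Statement := by
  intro Lay hLay μ hμ u₀ hcode hld1 hld4 hgetn hget8 g A v hb
  exact Vorbis.Spec.start_decoder_2b.seg2b hLay hμ hcode hld1 hld4 hgetn hget8 hb
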